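-- pv_equiv track=rewrite | github.com/MostofaSandwich/PyWeather | Code/scrubber.py | printListData
-- ===== SOURCE A (Python) =====
-- def printListData(dataList):
--     returnString = ""
--     i = 1
--
--     for data in dataList:
--
--         returnString += data + "\n"
--         if i % 2 == 0:
--             returnString += "\n"
--         i += 1
--
--     return returnString
-- ===== SOURCE B (Python) =====
-- def printListData(dataList):
--     # pair-chunking: one fragment per chunk of two (or per odd tail), joined at the end
--     fragments = []
--     j = 0
--     n = len(dataList)
--     while j < n:
--         if j + 1 < n:
--             fragments.append(dataList[j] + "\n" + dataList[j + 1] + "\n" + "\n")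
--             j += 2
--         else:
--             fragments.append(dataList[j] + "\n")
--             j += 1
--     return "".join(fragments)
-- ===== Notes on version B (the rewrite author's own statement) =====
-- stated objective: alternative
-- what changed: Replaces the single per-item loop with an i % 2 counter by pair-chunking: one fragment per chunk of two (with blank line) or per odd tail, joined at the end.
import Mathlib
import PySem

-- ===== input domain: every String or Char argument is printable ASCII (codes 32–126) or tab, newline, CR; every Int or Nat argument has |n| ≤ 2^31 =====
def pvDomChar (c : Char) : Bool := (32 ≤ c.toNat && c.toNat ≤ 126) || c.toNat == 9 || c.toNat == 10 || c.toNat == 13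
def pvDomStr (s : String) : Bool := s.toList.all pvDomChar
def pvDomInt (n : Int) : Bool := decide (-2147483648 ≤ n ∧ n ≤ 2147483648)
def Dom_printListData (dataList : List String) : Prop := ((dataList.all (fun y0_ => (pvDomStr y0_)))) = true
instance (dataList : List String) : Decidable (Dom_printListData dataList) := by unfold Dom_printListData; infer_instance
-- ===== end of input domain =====

-- B replaces A's single per-item loop with an i % 2 counter by a pair-chunking recursion
-- that emits one fragment per chunk of two (or per odd tail) and joins them; alternative decomposition, same cost.

-- ===== PORT A =====
def printListData (dataList : List String) : String :=
  (dataList.foldl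
    (fun (st : String × Int) data =>
      let r := st.1 ++ data ++ "\n"
      (if st.2 % 2 == 0 then r ++ "\n" else r, st.2 + 1))
    ("", 1)).1

-- ===== PORT B =====
def pvChunk : List String → List String
  | [] => []
  | [x] => [x ++ "\n"]
  | x :: y :: rest => (x ++ "\n" ++ y ++ "\n" ++ "\n") :: pvChunk rest

def printListData_alt (dataList : List String) : String :=
  String.join (pvChunk dataList)

-- ===== PRECONDITION & SPEC =====
def Spec_printListData (dataList : List String) (out : String) : Prop := out = printListData_alt dataList
instance (dataList : List String) (out : String) : Decidable (Spec_printListData dataList out) := by unfold Spec_printListData; infer_instance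

-- ===== CLAIM (what is proved, stated in full; the proofs are below) =====
def Claim_equal_printListData : Prop := ∀ (dataList : List String), Dom_printListData dataList → Spec_printListData dataList (printListData dataList)

-- ===== LEMMAS AND PROOFS =====
theorem pvFoldlAppend (L : List String) : ∀ (s : String),
    L.foldl (fun r t => r ++ t) s = s ++ L.foldl (fun r t => r ++ t) "" := by
  induction L with
  | nil => simp
  | cons a L ih =>
      intro s
      simp only [List.foldl]
      rw [ih (s ++ a), ih ("" ++ a)]
      simp [String.append_assoc]

theorem pvJoinCons (a : String) (L : List String) :
    String.join (a :: L) = a ++ String.join L := by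
  simp only [String.join, List.foldl]
  rw [pvFoldlAppend L ("" ++ a)]
  simp

theorem pvFold_eq (l : List String) :
    ∀ (acc : String) (i : Int), i % 2 = 1 →
      (l.foldl
        (fun (st : String × Int) data =>
          let r := st.1 ++ data ++ "\n"
          (if st.2 % 2 == 0 then r ++ "\n" else r, st.2 + 1))
        (acc, i)).1 = acc ++ String.join (pvChunk l) := by
  induction l using pvChunk.induct with
  | case1 => simp [pvChunk, String.join]
  | case2 x =>
      intro acc i hi
      have h0 : (i % 2 == 0) = false := by simp; omega
      simp only [List.foldl, h0, Bool.false_eq_true, if_false]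
      simp [pvChunk, String.join, String.append_assoc]
  | case3 x y rest ih =>
      intro acc i hi
      have h0 : (i % 2 == 0) = false := by simp; omega
      have h1 : ((i + 1) % 2 == 0) = true := by simp; omega
      have h2 : (i + 1 + 1) % 2 = 1 := by omega
      simp only [List.foldl, h0, h1, Bool.false_eq_true, if_false, if_true]
      rw [ih _ _ h2, show pvChunk (x :: y :: rest) = (x ++ "\n" ++ y ++ "\n" ++ "\n") :: pvChunk rest from rfl,
          pvJoinCons]
      simp [String.append_assoc]

-- ===== VERDICT (by name: the statement is the Claim_ definition above) =====
theorem printListData_spec : Claim_equal_printListData := by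
  intro l _
  unfold Spec_printListData printListData printListData_alt
  rw [pvFold_eq l "" 1 (by norm_num)]
  simp
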